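-- pv_equiv track=rewrite | github.com/CSStudySession/AlgoInPython | Meta/LC1047 Remove All Adjacent Duplicates In String.py | remove_duplicates_by_three
-- ===== SOURCE A (Python) =====
-- def remove_duplicates_by_three(s:str) -> str:
--     if not s:
--         return  ""
--     stack = []
--     for ch in s:
--         if not stack:
--             stack.append([ch, 1])
--             continue # continue掉 避免后面逻辑混乱
--         if stack[-1][0] == ch: # 注意这里ch是变量 不是'ch'
--             stack[-1][1] += 1
--             continue
--
--         if stack[-1][1] >= 3:
--             if stack[-1][1] % 3 == 0:
--                 stack.pop()
--             else:
--                 stack[-1][1] = stack[-1][1] % 3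
--         if not stack or stack[-1][0] != ch:
--             stack.append([ch, 1])
--         elif stack[-1][0] == ch:
--             stack[-1][1] += 1
--
--     if stack and stack[-1][1] >= 3: # 最后一个元素在stack上做处理
--         if stack[-1][1] % 3 == 0:
--             stack.pop()
--         else:
--             stack[-1][1] = stack[-1][1] % 3
--     ret = []
--     for item in stack:
--         ret.append(item[1] * item[0])
--     return ''.join(ret)
-- ===== SOURCE B (Python) =====
-- def remove_duplicates_by_three(s: str) -> str:
--     stack = []
--     for ch in s:
--         stack.append(ch)
--         if len(stack) >= 3 and stack[-1] == stack[-2] == stack[-3]: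
--             del stack[-3:]
--     return ''.join(stack)
-- ===== Notes on version B (the rewrite author's own statement) =====
-- stated objective: simpler
-- what changed: B maintains a stack of raw characters and deletes the top three whenever they are equal, replacing A's [char,count]-pair stack with lazy mod-3 collapsing at run boundaries and a final collapse pass.
import Mathlib
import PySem

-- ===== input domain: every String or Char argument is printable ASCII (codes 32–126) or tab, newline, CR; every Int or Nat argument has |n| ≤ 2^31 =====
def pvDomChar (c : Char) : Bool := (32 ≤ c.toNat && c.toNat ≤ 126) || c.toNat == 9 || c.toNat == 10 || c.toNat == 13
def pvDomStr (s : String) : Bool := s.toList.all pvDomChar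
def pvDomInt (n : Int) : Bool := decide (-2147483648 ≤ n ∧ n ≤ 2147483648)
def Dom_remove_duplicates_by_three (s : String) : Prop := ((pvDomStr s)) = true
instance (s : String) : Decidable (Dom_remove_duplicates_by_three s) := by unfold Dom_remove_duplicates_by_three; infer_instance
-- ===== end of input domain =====

-- B replaces A's [char,count]-pair stack (lazy mod-3 collapsing at run boundaries plus a final
-- collapse pass) by a plain stack of raw characters from which an equal top triple is deleted.

-- ===== PORT A =====
-- A's stack is kept head-as-top (Python appends/pops at the right end; same entries, same tests in the same order).
-- One iteration of A's `for ch in s` loop body: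
def pvAStep (st : List (Char × Int)) (ch : Char) : List (Char × Int) :=
  match st with
  | [] => [(ch, 1)]                                   -- if not stack: stack.append([ch,1]); continue
  | (c, n) :: rest =>
    if c = ch then (c, n + 1) :: rest                 -- if stack[-1][0] == ch: stack[-1][1] += 1; continue
    else
      -- if stack[-1][1] >= 3: pop, or reduce the count mod 3
      let st' := if n ≥ 3 then
          (if PySem.Int.mod n 3 = 0 then rest else (c, PySem.Int.mod n 3) :: rest)
        else (c, n) :: rest
      match st' with
      | [] => [(ch, 1)]                               -- if not stack …: append
      | (c', n') :: rest' =>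
        if c' ≠ ch then (ch, 1) :: (c', n') :: rest'  -- … or stack[-1][0] != ch: append
        else (c', n' + 1) :: rest'                    -- elif stack[-1][0] == ch: increment

-- the trailing `if stack and stack[-1][1] >= 3` fix-up of the top entry:
def pvAFinal (st : List (Char × Int)) : List (Char × Int) :=
  match st with
  | [] => []
  | (c, n) :: rest =>
    if n ≥ 3 then
      (if PySem.Int.mod n 3 = 0 then rest else (c, PySem.Int.mod n 3) :: rest)
    else (c, n) :: rest

def remove_duplicates_by_three (s : String) : String :=
  if s.toList = [] then ""                            -- if not s: return ""
  else
    let st := s.toList.foldl pvAStep []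
    let st2 := pvAFinal st
    -- ret = [item[1]*item[0] for item in stack]; ''.join(ret)  (stack bottom-to-top = st2.reverse;
    -- item[1]*item[0] is Python string repetition; the count is always ≥ 1 here, so .toNat is exact)
    String.ofList (st2.reverse.flatMap (fun p => List.replicate p.2.toNat p.1))

-- ===== PORT B =====
-- B's char stack, head-as-top: push ch, then delete the top three entries if they are all equal.
def pvBStep (l : List Char) (ch : Char) : List Char :=
  match l with
  | b :: c :: t => if ch = b ∧ ch = c then t else ch :: b :: c :: t
  | _ => ch :: l

def remove_duplicates_by_three_alt (s : String) : String :=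
  String.ofList ((s.toList.foldl pvBStep []).reverse)     -- ''.join(stack)

-- ===== PRECONDITION & SPEC =====
def Spec_remove_duplicates_by_three (s : String) (out : String) : Prop := out = remove_duplicates_by_three_alt s
instance (s : String) (out : String) : Decidable (Spec_remove_duplicates_by_three s out) := by unfold Spec_remove_duplicates_by_three; infer_instance

-- ===== CLAIM (what is proved, stated in full; the proofs are below) =====
def Claim_equal_remove_duplicates_by_three : Prop := ∀ (s : String), Dom_remove_duplicates_by_three s → Spec_remove_duplicates_by_three s (remove_duplicates_by_three s)

-- ===== LEMMAS AND PROOFS =====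

-- expansion of A's count stack into B's char stack: each (c,n) contributes (n mod 3) copies of c
def pvExpand (st : List (Char × Int)) : List Char :=
  st.flatMap (fun p => List.replicate ((p.2 % 3).toNat) p.1)

-- invariant on A's stack below the top entry: counts already reduced to 1 or 2, adjacent chars distinct
def pvBelow : List (Char × Int) → Char → Prop
  | [], _ => True
  | (c, n) :: rest, c0 => c ≠ c0 ∧ (n = 1 ∨ n = 2) ∧ pvBelow rest c

-- invariant on A's whole stack: top count ≥ 1, the rest reduced
def pvOk : List (Char × Int) → Prop
  | [] => True
  | (c, n) :: rest => 1 ≤ n ∧ pvBelow rest c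

theorem pvExpand_nil : pvExpand [] = [] := rfl

theorem pvExpand_cons (c : Char) (n : Int) (rest : List (Char × Int)) :
    pvExpand ((c, n) :: rest) = List.replicate ((n % 3).toNat) c ++ pvExpand rest := by
  simp [pvExpand]

theorem pvExpand_head_ne {rest : List (Char × Int)} {c0 : Char}
    (h : pvBelow rest c0) : (pvExpand rest).head? ≠ some c0 := by
  match rest with
  | [] => simp [pvExpand]
  | (c, n) :: r =>
    obtain ⟨hne, hn, _⟩ := h
    rcases hn with h1 | h1 <;> subst h1 <;>
      simp [pvExpand_cons, List.replicate, hne]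

theorem pvBStep_push {l : List Char} {ch : Char}
    (h : l.head? ≠ some ch) : pvBStep l ch = ch :: l := by
  match l with
  | [] => rfl
  | [x] => rfl
  | b :: c :: t =>
    simp only [List.head?] at h
    have hne : ¬ (ch = b ∧ ch = c) := fun ⟨h1, _⟩ => h (by rw [h1])
    simp [pvBStep, hne]

theorem pvBStep_push2 {l : List Char} {ch : Char}
    (h : l.head? ≠ some ch) : pvBStep (ch :: l) ch = ch :: ch :: l := by
  match l with
  | [] => rfl
  | x :: t =>
    simp only [List.head?] at h
    have hx : ¬ (ch = x) := fun h2 => h (by simp [h2])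
    simp [pvBStep, hx]

theorem pvBStep_pop {t : List Char} {ch : Char} : pvBStep (ch :: ch :: t) ch = t := by
  simp [pvBStep]

-- one step of A matches one step of B through the expansion, and the invariant is preserved
theorem pvStep_main (ch : Char) (st : List (Char × Int)) (h : pvOk st) :
    pvBStep (pvExpand st) ch = pvExpand (pvAStep st ch) ∧ pvOk (pvAStep st ch) := by
  match st with
  | [] =>
    refine ⟨rfl, ?_⟩
    simp [pvAStep, pvOk, pvBelow]
  | (c, n) :: rest =>
    obtain ⟨hn1, hb⟩ := h
    have hhd := pvExpand_head_ne hb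
    by_cases hc : c = ch
    · -- run continues: A increments the top count
      subst hc
      have hA : pvAStep ((c, n) :: rest) c = (c, n + 1) :: rest := by simp [pvAStep]
      rw [hA]
      refine ⟨?_, by exact ⟨by omega, hb⟩⟩
      rw [pvExpand_cons, pvExpand_cons]
      have h3 : (n % 3).toNat = 0 ∨ (n % 3).toNat = 1 ∨ (n % 3).toNat = 2 := by omega
      rcases h3 with h3 | h3 | h3
      · have h4 : ((n + 1) % 3).toNat = 1 := by omega
        rw [h3, h4]
        simpa using pvBStep_push hhd
      · have h4 : ((n + 1) % 3).toNat = 2 := by omega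
        rw [h3, h4]
        simpa [List.replicate] using pvBStep_push2 hhd
      · have h4 : ((n + 1) % 3).toNat = 0 := by omega
        rw [h3, h4]
        simpa [List.replicate] using pvBStep_pop
    · -- run boundary
      by_cases h3 : n ≥ 3
      · by_cases hm : n % 3 = 0
        · -- top collapses away entirely
          have hE : pvExpand ((c, n) :: rest) = pvExpand rest := by
            rw [pvExpand_cons]; simp [hm]
          rw [hE]
          cases rest with
          | nil =>
            have hA : pvAStep ((c, n) :: ([] : List (Char × Int))) ch = [(ch, 1)] := by
              simp [pvAStep, hc, h3, hm]
            rw [hA]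
            exact ⟨rfl, by simp [pvOk, pvBelow]⟩
          | cons p r2 =>
            obtain ⟨c2, n2⟩ := p
            obtain ⟨hb1, hb2, hb3⟩ := hb
            by_cases hc2 : c2 = ch
            · -- merge across the collapsed boundary
              subst hc2
              have hA : pvAStep ((c, n) :: (c2, n2) :: r2) c2 = (c2, n2 + 1) :: r2 := by
                simp [pvAStep, hc, h3, hm]
              rw [hA]
              have hhd2 := pvExpand_head_ne hb3
              refine ⟨?_, ⟨by omega, hb3⟩⟩
              rw [pvExpand_cons, pvExpand_cons]
              rcases hb2 with h2 | h2 <;> subst h2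
              · norm_num
                simpa [List.replicate] using pvBStep_push2 hhd2
              · norm_num
                simpa [List.replicate] using pvBStep_pop
            · have hA : pvAStep ((c, n) :: (c2, n2) :: r2) ch = (ch, 1) :: (c2, n2) :: r2 := by
                simp [pvAStep, hc, h3, hm, hc2]
              rw [hA]
              refine ⟨?_, ⟨le_refl 1, hc2, hb2, hb3⟩⟩
              have hhd2 : (pvExpand ((c2, n2) :: r2)).head? ≠ some ch := by
                rw [pvExpand_cons]
                rcases hb2 with h2 | h2 <;> subst h2 <;>
                  simpa [List.replicate] using hc2
              rw [pvExpand_cons (n := 1)]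
              have h1 : ((1 : Int) % 3).toNat = 1 := by decide
              rw [h1]
              simpa using pvBStep_push hhd2
        · -- top reduced to n % 3 ∈ {1,2}, then push
          have hmm : n % 3 = 1 ∨ n % 3 = 2 := by omega
          have hA : pvAStep ((c, n) :: rest) ch = (ch, 1) :: (c, n % 3) :: rest := by
            simp [pvAStep, hc, h3, hm]
          rw [hA]
          refine ⟨?_, ⟨le_refl 1, hc, hmm, hb⟩⟩
          simp only [pvExpand_cons]
          have hmod : (n % 3 % 3).toNat = (n % 3).toNat := by omega
          rw [hmod]
          have hhd2 : (List.replicate ((n % 3).toNat) c ++ pvExpand rest).head? ≠ some ch := by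
            rcases hmm with h2 | h2 <;> rw [h2] <;>
              simpa [List.replicate] using hc
          have h1 : ((1 : Int) % 3).toNat = 1 := by decide
          rw [h1]
          simpa using pvBStep_push hhd2
      · -- n ∈ {1,2}: no collapse, just push
        have hn12 : n = 1 ∨ n = 2 := by omega
        have hA : pvAStep ((c, n) :: rest) ch = (ch, 1) :: (c, n) :: rest := by
          simp [pvAStep, hc, h3]
        rw [hA]
        refine ⟨?_, ⟨le_refl 1, hc, hn12, hb⟩⟩
        simp only [pvExpand_cons]
        have hhd2 : (List.replicate ((n % 3).toNat) c ++ pvExpand rest).head? ≠ some ch := by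
          rcases hn12 with h2 | h2 <;> subst h2 <;>
            simpa [List.replicate] using hc
        have h1 : ((1 : Int) % 3).toNat = 1 := by decide
        rw [h1]
        simpa using pvBStep_push hhd2

theorem pvFold_main (l : List Char) (st : List (Char × Int)) (h : pvOk st) :
    l.foldl pvBStep (pvExpand st) = pvExpand (l.foldl pvAStep st) ∧ pvOk (l.foldl pvAStep st) := by
  induction l generalizing st with
  | nil => exact ⟨rfl, h⟩
  | cons x xs ih =>
    obtain ⟨h1, h2⟩ := pvStep_main x st h
    simpa [List.foldl_cons, h1] using ih (pvAStep st x) h2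

-- below the top, rendering with the raw count equals rendering mod 3 (counts are 1 or 2)
theorem pvRender_below {rest : List (Char × Int)} {c0 : Char} (h : pvBelow rest c0) :
    rest.flatMap (fun p => List.replicate p.2.toNat p.1) = pvExpand rest := by
  induction rest generalizing c0 with
  | nil => rfl
  | cons p r ih =>
    obtain ⟨c, n⟩ := p
    obtain ⟨_, hn, hr⟩ := h
    rw [List.flatMap_cons, pvExpand_cons, ih hr]
    rcases hn with h1 | h1 <;> subst h1 <;> norm_num

-- the final fix-up renders exactly the expansion of the loop's stack
theorem pvFinal_render {st : List (Char × Int)} (h : pvOk st) :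
    (pvAFinal st).flatMap (fun p => List.replicate p.2.toNat p.1) = pvExpand st := by
  match st with
  | [] => rfl
  | (c, n) :: rest =>
    obtain ⟨hn1, hb⟩ := h
    rw [pvExpand_cons]
    by_cases h3 : n ≥ 3
    · by_cases hm : n % 3 = 0
      · have hA : pvAFinal ((c, n) :: rest) = rest := by simp [pvAFinal, h3, hm]
        rw [hA, pvRender_below hb, hm]
        simp
      · have hA : pvAFinal ((c, n) :: rest) = (c, n % 3) :: rest := by
          simp [pvAFinal, h3, hm]
        rw [hA, List.flatMap_cons, pvRender_below hb]
    · have hA : pvAFinal ((c, n) :: rest) = (c, n) :: rest := by simp [pvAFinal, h3]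
      rw [hA, List.flatMap_cons, pvRender_below hb]
      have hnn : n.toNat = (n % 3).toNat := by omega
      rw [hnn]

-- ===== VERDICT (by name: the statement is the Claim_ definition above) =====
theorem remove_duplicates_by_three_spec : Claim_equal_remove_duplicates_by_three := by
  intro s _
  unfold Spec_remove_duplicates_by_three remove_duplicates_by_three remove_duplicates_by_three_alt
  by_cases hs : s.toList = []
  · simp [hs]
  · simp only [hs, if_false]
    obtain ⟨hfold, hok⟩ := pvFold_main s.toList [] trivial
    rw [pvExpand_nil] at hfold
    have hrev : (pvAFinal (s.toList.foldl pvAStep [])).reverse.flatMap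
        (fun p => List.replicate p.2.toNat p.1) =
        ((pvAFinal (s.toList.foldl pvAStep [])).flatMap
          (fun p => List.replicate p.2.toNat p.1)).reverse := by
      rw [List.reverse_flatMap]
      simp [Function.comp_def, List.reverse_replicate]
    rw [hrev, pvFinal_render hok, ← hfold]
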